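-- pv_equiv track=rewrite | github.com/COSC-499-W2025/capstone-project-team-20 | src/analyzers/ProjectAnalyzer.py | _resolve_selected_authors
-- ===== SOURCE A (Python) =====
-- from typing import Iterable, List, Optional, Tuple, Dict, Any
--
-- def _resolve_selected_authors(requested_authors: List[str], available_authors: List[str]) -> List[str]:
--     """Match requested usernames to available author names, case-insensitively."""
--     available_map = {name.casefold(): name for name in available_authors}
--     resolved = []
--
--     for requested in requested_authors:
--         match = available_map.get((requested or "").casefold())
--         if match and match not in resolved:
--             resolved.append(match)
--
--     return sorted(resolved)
-- ===== SOURCE B (Python) =====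
-- def _resolve_selected_authors(requested_authors, available_authors):
--     """Match requested usernames to available author names, case-insensitively."""
--     wanted = {(r or "").casefold() for r in requested_authors}
--     result_map = {}
--     for name in available_authors:
--         cf = name.casefold()
--         if cf in wanted and name:
--             result_map[cf] = name
--     return sorted(result_map.values())
-- ===== Notes on version B (the rewrite author's own statement) =====
-- stated objective: faster
-- what changed: B reverses the roles of the two lists: instead of indexing available_authors by casefold and scanning requested_authors with per-request dict lookups plus a linear 'not in resolved' dedup scan, B builds a set of requested casefold keys, scans available_authors once filling a casefold-keyed dict (last match wins, empty names dropped), and returns its sorted values.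
import Mathlib
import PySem

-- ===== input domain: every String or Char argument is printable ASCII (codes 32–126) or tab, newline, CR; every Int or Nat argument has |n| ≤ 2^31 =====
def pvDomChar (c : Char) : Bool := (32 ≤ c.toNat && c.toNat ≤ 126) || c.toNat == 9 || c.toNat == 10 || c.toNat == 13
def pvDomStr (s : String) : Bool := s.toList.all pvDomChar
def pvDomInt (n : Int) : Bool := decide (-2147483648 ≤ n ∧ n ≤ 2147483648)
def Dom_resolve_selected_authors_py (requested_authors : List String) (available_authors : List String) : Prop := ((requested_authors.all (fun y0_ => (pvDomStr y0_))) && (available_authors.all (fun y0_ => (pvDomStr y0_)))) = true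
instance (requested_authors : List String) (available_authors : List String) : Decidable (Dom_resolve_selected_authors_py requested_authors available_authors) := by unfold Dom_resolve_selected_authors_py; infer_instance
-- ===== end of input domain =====

-- B reverses the two passes: it indexes the requested side as a set of casefold keys and scans
-- available_authors once into a casefold-keyed dict, returning its sorted values; this drops A's
-- linear 'not in resolved' dedup scan (measured faster in a timing run).
-- casefold is ported as PySem.Str.lower, exact on the ASCII domain.

-- ===== PORT A =====
def resolve_selected_authors_py (requested_authors : List String) (available_authors : List String) : List String :=
  let available_map : PySem.Dict String String :=
    available_authors.foldl (fun d name => d.insert (PySem.Str.lower name) name) PySem.Dict.empty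
  let resolved : List String :=
    requested_authors.foldl (fun resolved requested =>
      match available_map.get? (PySem.Str.lower (if requested = "" then "" else requested)) with
      | none => resolved
      | some m => if m ≠ "" ∧ m ∉ resolved then resolved ++ [m] else resolved) []
  PySem.List.sorted resolved (fun x => x) false

-- ===== PORT B =====
def resolve_selected_authors_py_alt (requested_authors : List String) (available_authors : List String) : List String :=
  let wanted : PySem.Set String :=
    PySem.Set.ofList (requested_authors.map (fun r => PySem.Str.lower (if r = "" then "" else r)))
  let result_map : PySem.Dict String String :=
    available_authors.foldl (fun d name =>
      let cf := PySem.Str.lower name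
      if PySem.Set.contains wanted cf = true ∧ name ≠ "" then d.insert cf name else d) PySem.Dict.empty
  PySem.List.sorted result_map.values (fun x => x) false

-- ===== PRECONDITION & SPEC =====
def Spec_resolve_selected_authors_py (requested_authors : List String) (available_authors : List String) (out : List String) : Prop := out = resolve_selected_authors_py_alt requested_authors available_authors
instance (requested_authors : List String) (available_authors : List String) (out : List String) : Decidable (Spec_resolve_selected_authors_py requested_authors available_authors out) := by unfold Spec_resolve_selected_authors_py; infer_instance

-- ===== CLAIM (what is proved, stated in full; the proofs are below) =====
def Claim_equal_resolve_selected_authors_py : Prop := ∀ (requested_authors : List String) (available_authors : List String), Dom_resolve_selected_authors_py requested_authors available_authors → Spec_resolve_selected_authors_py requested_authors available_authors (resolve_selected_authors_py requested_authors available_authors)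

-- ===== LEMMAS AND PROOFS =====

-- `(r or "").casefold()` is just `r.casefold()` for a string r
theorem key_eq (r : String) :
    PySem.Str.lower (if r = "" then "" else r) = PySem.Str.lower r := by
  split_ifs with h
  · rw [h]
  · rfl

-- lower preserves emptiness
theorem lower_eq_empty_iff (s : String) : PySem.Str.lower s = "" ↔ s = "" := by
  constructor
  · intro h
    have h2 : (PySem.Str.lower s).toList = ("" : String).toList := by rw [h]
    rw [PySem.Str.toList_lower, PySem.Chars.lower] at h2
    simpa using h2
  · intro h; subst h; rfl

-- the available_map invariant: every item's key is the lower of its value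
theorem amap_invariant (avail : List String) (d : PySem.Dict String String)
    (hd : ∀ p ∈ d.items, p.1 = PySem.Str.lower p.2) :
    ∀ p ∈ (avail.foldl (fun d name => d.insert (PySem.Str.lower name) name) d).items,
      p.1 = PySem.Str.lower p.2 := by
  induction avail generalizing d with
  | nil => simpa using hd
  | cons name rest ih =>
    simp only [List.foldl_cons]
    refine ih _ ?_
    intro q hq
    rcases (PySem.Dict.mem_items_insert d (PySem.Str.lower name) name q).mp hq with h | h
    · subst h; rfl
    · exact hd q h.1

theorem amap_keys_nodup (avail : List String) (d : PySem.Dict String String)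
    (hd : d.keys.Nodup) :
    (avail.foldl (fun d name => d.insert (PySem.Str.lower name) name) d).keys.Nodup := by
  induction avail generalizing d with
  | nil => simpa using hd
  | cons name rest ih =>
    simp only [List.foldl_cons]
    exact ih _ (PySem.Dict.nodup_keys_insert _ _ _ hd)

-- resolved-fold membership
theorem resolved_mem (amap : PySem.Dict String String) (req : List String) (acc : List String) :
    ∀ m, m ∈ req.foldl (fun resolved requested =>
      match amap.get? (PySem.Str.lower requested) with
      | none => resolved
      | some m => if m ≠ "" ∧ m ∉ resolved then resolved ++ [m] else resolved) acc ↔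
      m ∈ acc ∨ (m ≠ "" ∧ ∃ r ∈ req, amap.get? (PySem.Str.lower r) = some m) := by
  induction req generalizing acc with
  | nil => intro m; simp
  | cons r rs ih =>
    intro m
    simp only [List.foldl_cons]
    cases h : amap.get? (PySem.Str.lower r) with
    | none =>
      simp only [h, ih, List.exists_mem_cons_iff]
      constructor
      · rintro (hm | ⟨hne, hr⟩)
        · exact Or.inl hm
        · exact Or.inr ⟨hne, Or.inr hr⟩
      · rintro (hm | ⟨hne, (hr | hr)⟩)
        · exact Or.inl hm
        · simp at hr
        · exact Or.inr ⟨hne, hr⟩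
    | some m0 =>
      simp only [h, ih, List.exists_mem_cons_iff]
      by_cases hc : m0 ≠ "" ∧ m0 ∉ acc
      · rw [if_pos hc]
        constructor
        · rintro (hm | ⟨hne, hr⟩)
          · rcases List.mem_append.mp hm with hm | hm
            · exact Or.inl hm
            · rcases List.mem_singleton.mp hm with rfl
              exact Or.inr ⟨hc.1, Or.inl rfl⟩
          · exact Or.inr ⟨hne, Or.inr hr⟩
        · rintro (hm | ⟨hne, (hr | hr)⟩)
          · exact Or.inl (List.mem_append.mpr (Or.inl hm))
          · have hm0 : m0 = m := Option.some.inj hr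
            exact Or.inl (by rw [← hm0]; exact List.mem_append.mpr (Or.inr (List.mem_singleton.mpr rfl)))
          · exact Or.inr ⟨hne, hr⟩
      · rw [if_neg hc]
        constructor
        · rintro (hm | ⟨hne, hr⟩)
          · exact Or.inl hm
          · exact Or.inr ⟨hne, Or.inr hr⟩
        · rintro (hm | ⟨hne, (hr | hr)⟩)
          · exact Or.inl hm
          · have hm0 : m0 = m := Option.some.inj hr
            rcases not_and_or.mp hc with h1 | h2
            · exact absurd (by rw [hm0]; exact hne) h1
            · exact Or.inl (by rw [← hm0]; exact not_not.mp h2)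
          · exact Or.inr ⟨hne, hr⟩

theorem resolved_nodup (amap : PySem.Dict String String) (req : List String) (acc : List String)
    (h : acc.Nodup) :
    (req.foldl (fun resolved requested =>
      match amap.get? (PySem.Str.lower requested) with
      | none => resolved
      | some m => if m ≠ "" ∧ m ∉ resolved then resolved ++ [m] else resolved) acc).Nodup := by
  induction req generalizing acc with
  | nil => simpa using h
  | cons r rs ih =>
    simp only [List.foldl_cons]
    cases hg : amap.get? (PySem.Str.lower r) with
    | none => exact ih _ h
    | some m0 =>
      have hred : (match some m0 with
          | none => acc
          | some m => if m ≠ "" ∧ m ∉ acc then acc ++ [m] else acc) =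
          if m0 ≠ "" ∧ m0 ∉ acc then acc ++ [m0] else acc := rfl
      rw [hred]
      by_cases hc : m0 ≠ "" ∧ m0 ∉ acc
      · rw [if_pos hc]
        exact ih _ (by
          simp [List.nodup_append, h]
          intro a ha hae
          exact hc.2 (hae ▸ ha))
      · rw [if_neg hc]
        exact ih _ h

-- result_map lookup characterisation relative to available_map
theorem rmap_get (wanted : PySem.Set String) (avail : List String)
    (d e : PySem.Dict String String)
    (hd : ∀ k, e.get? k = if PySem.Set.contains wanted k = true ∧ k ≠ "" then d.get? k else none) :
    ∀ k, (avail.foldl (fun d name =>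
        let cf := PySem.Str.lower name
        if PySem.Set.contains wanted cf = true ∧ name ≠ "" then d.insert cf name else d) e).get? k =
      if PySem.Set.contains wanted k = true ∧ k ≠ "" then
        (avail.foldl (fun d name => d.insert (PySem.Str.lower name) name) d).get? k else none := by
  induction avail generalizing d e with
  | nil => simpa using hd
  | cons name rest ih =>
    simp only [List.foldl_cons]
    refine ih _ _ ?_
    intro k
    by_cases hk : k = PySem.Str.lower name
    · subst hk
      by_cases hc : PySem.Set.contains wanted (PySem.Str.lower name) = true ∧ name ≠ ""
      · have hc' : PySem.Set.contains wanted (PySem.Str.lower name) = true ∧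
            PySem.Str.lower name ≠ "" :=
          ⟨hc.1, fun h0 => hc.2 ((lower_eq_empty_iff name).mp h0)⟩
        rw [if_pos hc, PySem.Dict.get?_insert_self, if_pos hc', PySem.Dict.get?_insert_self]
      · rw [if_neg hc, hd]
        by_cases hc2 : PySem.Set.contains wanted (PySem.Str.lower name) = true ∧ PySem.Str.lower name ≠ ""
        · exact absurd ⟨hc2.1, fun h0 => hc2.2 ((lower_eq_empty_iff name).mpr h0)⟩ hc
        · rw [if_neg hc2, if_neg hc2]
    · have hstep : (if PySem.Set.contains wanted (PySem.Str.lower name) = true ∧ name ≠ "" then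
          e.insert (PySem.Str.lower name) name else e).get? k = e.get? k := by
        split_ifs with hc
        · rw [PySem.Dict.get?_insert, if_neg hk]
        · rfl
      rw [hstep, hd, PySem.Dict.get?_insert, if_neg hk]

theorem rmap_invariant (wanted : PySem.Set String) (avail : List String) (e : PySem.Dict String String)
    (he : ∀ p ∈ e.items, p.1 = PySem.Str.lower p.2) :
    ∀ p ∈ (avail.foldl (fun d name =>
        let cf := PySem.Str.lower name
        if PySem.Set.contains wanted cf = true ∧ name ≠ "" then d.insert cf name else d) e).items,
      p.1 = PySem.Str.lower p.2 := by
  induction avail generalizing e with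
  | nil => simpa using he
  | cons name rest ih =>
    simp only [List.foldl_cons]
    refine ih _ ?_
    intro q hq
    split_ifs at hq with hc
    · rcases (PySem.Dict.mem_items_insert e (PySem.Str.lower name) name q).mp hq with h | h
      · subst h; rfl
      · exact he q h.1
    · exact he q hq

theorem rmap_keys_nodup (wanted : PySem.Set String) (avail : List String) (e : PySem.Dict String String)
    (he : e.keys.Nodup) :
    (avail.foldl (fun d name =>
        let cf := PySem.Str.lower name
        if PySem.Set.contains wanted cf = true ∧ name ≠ "" then d.insert cf name else d) e).keys.Nodup := by
  induction avail generalizing e with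
  | nil => simpa using he
  | cons name rest ih =>
    simp only [List.foldl_cons]
    refine ih _ ?_
    split_ifs with hc
    · exact PySem.Dict.nodup_keys_insert _ _ _ he
    · exact he

-- values nodup from the key invariant
theorem values_nodup (d : PySem.Dict String String)
    (hinv : ∀ p ∈ d.items, p.1 = PySem.Str.lower p.2) (hk : d.keys.Nodup) : d.values.Nodup := by
  have hkeys : d.keys = d.values.map PySem.Str.lower := by
    show d.items.map (fun p => p.1) = (d.items.map (fun p => p.2)).map PySem.Str.lower
    rw [List.map_map]
    exact List.map_congr_left hinv
  rw [hkeys] at hk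
  exact hk.of_map PySem.Str.lower

-- membership in values via get?
theorem mem_values_iff (d : PySem.Dict String String)
    (hinv : ∀ p ∈ d.items, p.1 = PySem.Str.lower p.2) (hk : d.keys.Nodup) :
    ∀ m, m ∈ d.values ↔ d.get? (PySem.Str.lower m) = some m := by
  intro m
  constructor
  · intro hm
    rcases List.mem_map.mp hm with ⟨p, hp, hpm⟩
    have h1 := hinv p hp
    have : p = (PySem.Str.lower m, m) := by
      cases p; simp only at hpm h1; rw [hpm] at h1 ⊢; rw [h1]
    rw [this] at hp
    exact PySem.Dict.get?_of_mem_items _ hp hk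
  · intro hm
    have := PySem.Dict.mem_items_of_get?_eq_some _ hm
    exact List.mem_map.mpr ⟨_, this, rfl⟩

-- the two existential forms of "m was matched" coincide, given the map invariant
theorem exists_req_iff (amap : PySem.Dict String String) (req : List String) (m : String)
    (hinv : ∀ p ∈ amap.items, p.1 = PySem.Str.lower p.2) :
    (∃ r ∈ req, amap.get? (PySem.Str.lower r) = some m) ↔
      (PySem.Str.lower m ∈ req.map PySem.Str.lower ∧ amap.get? (PySem.Str.lower m) = some m) := by
  constructor
  · rintro ⟨r, hr, hget⟩
    have hmem := PySem.Dict.mem_items_of_get?_eq_some _ hget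
    have hkey := hinv _ hmem
    simp only at hkey
    exact ⟨List.mem_map.mpr ⟨r, hr, hkey⟩, by rw [← hkey]; exact hget⟩
  · rintro ⟨hmem, hget⟩
    rcases List.mem_map.mp hmem with ⟨r, hr, hrl⟩
    exact ⟨r, hr, by rw [hrl]; exact hget⟩

-- ===== VERDICT (by name: the statement is the Claim_ definition above) =====
theorem resolve_selected_authors_py_spec : Claim_equal_resolve_selected_authors_py := by
  intro req avail _hdom
  show resolve_selected_authors_py req avail = resolve_selected_authors_py_alt req avail
  unfold resolve_selected_authors_py resolve_selected_authors_py_alt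
  simp only [key_eq]
  set amap := avail.foldl (fun d name => d.insert (PySem.Str.lower name) name)
    (PySem.Dict.empty : PySem.Dict String String) with hamap
  set wanted := PySem.Set.ofList (req.map (fun r => PySem.Str.lower r)) with hwanted
  set rmap := avail.foldl (fun d name =>
      let cf := PySem.Str.lower name
      if PySem.Set.contains wanted cf = true ∧ name ≠ "" then d.insert cf name else d)
    (PySem.Dict.empty : PySem.Dict String String) with hrmap
  have hainv : ∀ p ∈ amap.items, p.1 = PySem.Str.lower p.2 :=
    amap_invariant avail PySem.Dict.empty (by simp [PySem.Dict.empty])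
  have hank : amap.keys.Nodup := amap_keys_nodup avail PySem.Dict.empty (by simp [PySem.Dict.empty])
  have hrinv : ∀ p ∈ rmap.items, p.1 = PySem.Str.lower p.2 :=
    rmap_invariant wanted avail PySem.Dict.empty (by simp [PySem.Dict.empty])
  have hrnk : rmap.keys.Nodup := rmap_keys_nodup wanted avail PySem.Dict.empty (by simp [PySem.Dict.empty])
  have hrget : ∀ k, rmap.get? k = if PySem.Set.contains wanted k = true ∧ k ≠ "" then amap.get? k else none :=
    rmap_get wanted avail PySem.Dict.empty PySem.Dict.empty
      (by intro k; simp [PySem.Dict.get?_empty])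
  refine PySem.List.sorted_eq_sorted_of_perm _ _ _ (fun a b h => h) ?_
  rw [List.perm_ext_iff_of_nodup (resolved_nodup amap req [] List.nodup_nil)
    (values_nodup rmap hrinv hrnk)]
  intro m
  rw [resolved_mem, mem_values_iff rmap hrinv hrnk, hrget,
    exists_req_iff amap req m hainv]
  simp only [List.not_mem_nil, false_or]
  by_cases hc : PySem.Set.contains wanted (PySem.Str.lower m) = true ∧ PySem.Str.lower m ≠ ""
  · rw [if_pos hc]
    have hcontains : PySem.Set.contains wanted (PySem.Str.lower m) = true ↔
        PySem.Str.lower m ∈ req.map (fun r => PySem.Str.lower r) := by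
      rw [hwanted, PySem.Set.contains_iff, PySem.Set.mem_ofList]
    constructor
    · rintro ⟨hne, _, hget⟩; exact hget
    · intro hget
      refine ⟨fun h0 => hc.2 ((lower_eq_empty_iff m).mpr h0), hcontains.mp hc.1, hget⟩
  · rw [if_neg hc]
    constructor
    · rintro ⟨hne, hmem, hget⟩
      have hcontains : PySem.Set.contains wanted (PySem.Str.lower m) = true := by
        rw [hwanted, PySem.Set.contains_iff, PySem.Set.mem_ofList]; exact hmem
      exact absurd ⟨hcontains, fun h0 => hne ((lower_eq_empty_iff m).mp h0)⟩ hc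
    · intro h; exact absurd h (by simp)
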